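-- pv_equiv track=rewrite | github.com/mrkomoruyi/pytorch-deep-learning | train_test.py | combine_metrics_dicts
-- ===== SOURCE A (Python) =====
-- from typing import Any, Tuple, List, Dict
--
-- def combine_metrics_dicts(metrics_dicts: List)->Dict[str, Any]:
--     """Combines individual dictionaries (which have been put into a single `List`) containing any number of metrics into a single dictionary.
--     Args: `metrics_dicts` a list containing dictionaries which all have same keys: the metrics.
--     Returns: a single `Dict[metric, List[value]]` which contains individual metric with all the values of the metrics combined.
--     """
--     metrics_dict = {metric:[] for metric in metrics_dicts[0].keys()}
--     for i in range(len(metrics_dicts)):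
--         for metric, value in metrics_dicts[i].items():
--             if metric not in metrics_dict.keys():
--                 raise ValueError(f'Invalid metric of name: {metric} in `Dict` {metrics_dicts[i]} inputed. Expected one of: {metrics_dict.keys()}')
--             metrics_dict[metric].append(value)
--     return metrics_dict
-- ===== SOURCE B (Python) =====
-- def combine_metrics_dicts(metrics_dicts):
--     """Column-wise re-implementation: validate keys first, then gather each
--     metric's values across all dicts with a comprehension."""
--     allowed = metrics_dicts[0].keys()
--     for d in metrics_dicts:
--         for metric in d:
--             if metric not in allowed:
--                 raise ValueError(f'Invalid metric of name: {metric} in `Dict` {d} inputed. Expected one of: {allowed}')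
--     return {metric: [d[metric] for d in metrics_dicts if metric in d] for metric in allowed}
-- ===== Notes on version B (the rewrite author's own statement) =====
-- stated objective: alternative
-- what changed: B replaces A's row-wise accumulator dict (initialised to empty lists and mutated by appending per input dict) with an up-front validation pass plus a column-wise dict-comprehension that gathers each metric's values across all dicts.
import Mathlib
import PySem

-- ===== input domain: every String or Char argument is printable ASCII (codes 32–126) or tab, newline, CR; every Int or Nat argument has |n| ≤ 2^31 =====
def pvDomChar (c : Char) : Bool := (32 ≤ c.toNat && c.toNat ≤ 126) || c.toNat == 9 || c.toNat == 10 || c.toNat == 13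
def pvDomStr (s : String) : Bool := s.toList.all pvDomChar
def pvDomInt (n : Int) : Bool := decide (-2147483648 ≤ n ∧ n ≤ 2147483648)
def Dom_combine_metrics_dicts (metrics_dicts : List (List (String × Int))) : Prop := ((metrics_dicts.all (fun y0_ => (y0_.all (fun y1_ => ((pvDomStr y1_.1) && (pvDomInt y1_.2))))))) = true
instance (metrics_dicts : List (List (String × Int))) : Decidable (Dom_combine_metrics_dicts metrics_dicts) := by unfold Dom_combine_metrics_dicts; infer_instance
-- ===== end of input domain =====

-- B replaces A's row-wise accumulator dict with a validation pass plus a column-wise gather per metric (objective: alternative).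

-- ===== PORT A =====
-- inner loop "for metric, value in metrics_dicts[i].items(): if metric not in metrics_dict: raise; metrics_dict[metric].append(value)"
def pvA_row (md : PySem.Dict String (List Int)) : List (String × Int) → Option (PySem.Dict String (List Int))
  | [] => some md
  | p :: rest =>
    if md.contains p.1 then pvA_row (md.modify p.1 [] (fun vs => vs ++ [p.2])) rest
    else none  -- ValueError

-- outer loop "for i in range(len(metrics_dicts)): …"
def pvA_rows (md : PySem.Dict String (List Int)) : List (PySem.Dict String Int) → Option (PySem.Dict String (List Int))
  | [] => some md
  | d :: ds =>
    match pvA_row md d.items with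
    | some md' => pvA_rows md' ds
    | none => none

def combine_metrics_dicts (metrics_dicts : List (List (String × Int))) : List (String × List Int) :=
  match metrics_dicts.map PySem.Dict.ofList with
  | [] => []  -- Python raises IndexError on metrics_dicts[0]; excluded by Pre_
  | d0 :: ds =>
    -- metrics_dict = {metric: [] for metric in metrics_dicts[0].keys()}
    let init := d0.keys.foldl (fun d k => d.insert k ([] : List Int)) PySem.Dict.empty
    match pvA_rows init (d0 :: ds) with
    | some md => md.items
    | none => []  -- ValueError; excluded by Pre_

-- ===== PORT B =====
def combine_metrics_dicts_alt (metrics_dicts : List (List (String × Int))) : List (String × List Int) :=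
  match metrics_dicts.map PySem.Dict.ofList with
  | [] => []  -- IndexError on metrics_dicts[0]; excluded by Pre_
  | d0 :: ds =>
    let allowed := d0.keys
    -- validation pass: for d in metrics_dicts: for metric in d: if metric not in allowed: raise
    if (d0 :: ds).all (fun d => d.keys.all (fun k => allowed.contains k)) then
      -- {metric: [d[metric] for d in metrics_dicts if metric in d] for metric in allowed}
      allowed.map (fun m => (m, (d0 :: ds).filterMap (fun d => d.get? m)))
    else []  -- ValueError; excluded by Pre_

-- ===== PRECONDITION & SPEC =====
-- Pre_ excludes exactly the inputs where A raises: the empty list (IndexError) and inputs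
-- containing a metric key absent from the first dict (ValueError). B raises identically there.
def Pre_combine_metrics_dicts (metrics_dicts : List (List (String × Int))) : Prop :=
  metrics_dicts ≠ [] ∧
  ∀ d ∈ metrics_dicts, ∀ p ∈ d, (metrics_dicts.headD []).any (fun q => q.1 == p.1) = true
instance (metrics_dicts : List (List (String × Int))) : Decidable (Pre_combine_metrics_dicts metrics_dicts) := by unfold Pre_combine_metrics_dicts; infer_instance

def pvWitness_combine_metrics_dicts : (List (List (String × Int))) := [[("a", 1), ("b", 2)], [("b", 5), ("a", 3)]]

def Spec_combine_metrics_dicts (metrics_dicts : List (List (String × Int))) (out : List (String × List Int)) : Prop := out = combine_metrics_dicts_alt metrics_dicts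
instance (metrics_dicts : List (List (String × Int))) (out : List (String × List Int)) : Decidable (Spec_combine_metrics_dicts metrics_dicts out) := by unfold Spec_combine_metrics_dicts; infer_instance

-- ===== CLAIM (what is proved, stated in full; the proofs are below) =====
def Claim_equal_combine_metrics_dicts : Prop := ∀ (metrics_dicts : List (List (String × Int))), Dom_combine_metrics_dicts metrics_dicts → Pre_combine_metrics_dicts metrics_dicts → Spec_combine_metrics_dicts metrics_dicts (combine_metrics_dicts metrics_dicts)

-- ===== LEMMAS AND PROOFS =====

theorem pv_keys_ofList (l : List (String × Int)) :
    (PySem.Dict.ofList l).keys = PySem.Set.ofList (l.map (fun p => p.1)) := by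
  have h := PySem.Dict.keys_foldl_insert_key l (fun p => p.1) (fun _ p => p.2) PySem.Dict.empty
  simpa [PySem.Dict.ofList, PySem.Dict.update, PySem.Dict.keys_empty, PySem.Set.update_nil_left] using h

theorem pv_filter_map_eq_find (l : List (String × Int)) (k : String)
    (h : (l.map (fun p => p.1)).Nodup) :
    (l.filter (fun p => p.1 == k)).map (fun p => p.2)
      = (Option.map (fun p => p.2) (l.find? (fun p => p.1 == k))).toList := by
  induction l with
  | nil => simp
  | cons a t ih =>
    simp only [List.map_cons, List.nodup_cons] at h
    by_cases hk : a.1 = k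
    · have ht : t.filter (fun p => p.1 == k) = [] := by
        apply List.filter_eq_nil_iff.mpr
        intro p hp hpk
        exact h.1 (hk ▸ (by simpa using hpk) ▸ List.mem_map_of_mem hp)
      simp [List.find?, hk, ht]
    · simp [List.find?, ih h.2, beq_false_of_ne hk]

theorem pv_row_ok (l : List (String × Int)) (md : PySem.Dict String (List Int))
    (h : ∀ p ∈ l, md.contains p.1 = true) :
    pvA_row md l = some (l.foldl (fun m p => m.modify p.1 [] (fun vs => vs ++ [p.2])) md) := by
  induction l generalizing md with
  | nil => rfl
  | cons p rest ih =>
    simp only [pvA_row, h p (by simp), if_true, List.foldl_cons]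
    apply ih
    intro q hq
    rw [PySem.Dict.contains_modify]
    simp [h q (List.mem_cons_of_mem _ hq)]

theorem pv_rows_ok (ds : List (PySem.Dict String Int)) (md : PySem.Dict String (List Int))
    (h : ∀ d ∈ ds, ∀ p ∈ d.items, md.contains p.1 = true)
    (hnd : ∀ d ∈ ds, d.keys.Nodup) :
    ∃ md', pvA_rows md ds = some md' ∧ md'.keys = md.keys ∧
      ∀ k, md'.getD k [] = md.getD k [] ++ ds.filterMap (fun d => d.get? k) := by
  induction ds generalizing md with
  | nil => exact ⟨md, rfl, rfl, by simp⟩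
  | cons d ds ih =>
    have hd : ∀ p ∈ d.items, md.contains p.1 = true := h d (by simp)
    set md1 := d.items.foldl (fun m p => m.modify p.1 [] (fun vs => vs ++ [p.2])) md with hmd1
    have hkeys1 : md1.keys = md.keys := by
      have hk := PySem.Dict.keys_foldl_modify_key d.items (fun p => p.1) [] (fun _ p vs => vs ++ [p.2]) md
      rw [hmd1, hk, PySem.Set.update_eq_append_filter]
      have : (PySem.Set.ofList (d.items.map (fun p => p.1))).filter (fun y => !PySem.Set.contains md.keys y) = [] := by
        apply List.filter_eq_nil_iff.mpr
        intro y hy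
        rw [PySem.Set.mem_ofList] at hy
        obtain ⟨p, hp, rfl⟩ := List.mem_map.mp hy
        have := (PySem.Dict.contains_iff_mem_keys md p.1).mp (hd p hp)
        simp [PySem.Set.contains, this]
      rw [this, List.append_nil]
    have hcont1 : ∀ k, md.contains k = true → md1.contains k = true := by
      intro k hk
      rw [PySem.Dict.contains_iff_mem_keys] at hk ⊢
      rw [hkeys1]; exact hk
    obtain ⟨md', hrun, hkeys, hget⟩ := ih md1
      (fun e he p hp => hcont1 p.1 (h e (List.mem_cons_of_mem _ he) p hp))
      (fun e he => hnd e (List.mem_cons_of_mem _ he))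
    refine ⟨md', ?_, by rw [hkeys, hkeys1], ?_⟩
    · simp only [pvA_rows, pv_row_ok d.items md hd, ← hmd1, hrun]
    · intro k
      have hg1 : md1.getD k [] = md.getD k [] ++ (Option.map (fun p => p.2) (d.items.find? (fun p => p.1 == k))).toList := by
        rw [hmd1, PySem.Dict.getD_foldl_modify_append,
            ← pv_filter_map_eq_find d.items k (hnd d (by simp))]
      have hfind : d.get? k = Option.map (fun p => p.2) (d.items.find? (fun p => p.1 == k)) := rfl
      rw [hget k, hg1, ← hfind, List.filterMap_cons]
      cases hgk : d.get? k <;> simp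

theorem pv_items_eq_keys_map (d : PySem.Dict String (List Int)) (h : d.keys.Nodup) :
    d.items = d.keys.map (fun k => (k, d.getD k [])) := by
  have h1 : d.keys.map (fun k => (k, d.getD k [])) = d.items.map (fun p => (p.1, d.getD p.1 [])) := by
    simp [PySem.Dict.keys, List.map_map]
  rw [h1]
  conv_lhs => rw [← List.map_id d.items]
  apply List.map_congr_left
  rintro ⟨k, v⟩ hp
  simp [PySem.Dict.getD_of_mem_items d hp h]

-- ===== VERDICT (by name: the statement is the Claim_ definition above) =====
theorem combine_metrics_dicts_spec : Claim_equal_combine_metrics_dicts := by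
  intro mds _ hpre
  obtain ⟨hne, hsub⟩ := hpre
  obtain ⟨l0, ls, rfl⟩ : ∃ l0 ls, mds = l0 :: ls := by
    cases mds with
    | nil => exact absurd rfl hne
    | cons a t => exact ⟨a, t, rfl⟩
  unfold Spec_combine_metrics_dicts combine_metrics_dicts combine_metrics_dicts_alt
  simp only [List.map_cons]
  set d0 := PySem.Dict.ofList l0 with hd0
  set ds := ls.map PySem.Dict.ofList with hds
  set allowed := d0.keys with hallowed
  have hnodup : allowed.Nodup := PySem.Dict.nodup_keys_ofList l0
  -- every key of every dict lies in allowed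
  have hofl : ∀ d ∈ d0 :: ds, ∃ l ∈ l0 :: ls, d = PySem.Dict.ofList l := by
    intro d hd
    rcases List.mem_cons.mp hd with rfl | h
    · exact ⟨l0, by simp, hd0⟩
    · obtain ⟨l, hl, he⟩ := List.mem_map.mp h
      exact ⟨l, by simp [hl], he.symm⟩
  have hsub' : ∀ d ∈ d0 :: ds, ∀ k ∈ d.keys, k ∈ allowed := by
    intro d hd k hk
    obtain ⟨l, hl, rfl⟩ := hofl d hd
    rw [pv_keys_ofList, PySem.Set.mem_ofList] at hk
    obtain ⟨p, hp, rfl⟩ := List.mem_map.mp hk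
    have := hsub l hl p hp
    simp only [List.headD_cons, List.any_eq_true] at this
    obtain ⟨q, hq, hqe⟩ := this
    rw [hallowed, hd0, pv_keys_ofList, PySem.Set.mem_ofList]
    exact (eq_of_beq hqe) ▸ List.mem_map_of_mem hq
  have hnd : ∀ d ∈ d0 :: ds, d.keys.Nodup := by
    intro d hd
    obtain ⟨l, _, rfl⟩ := hofl d hd
    exact PySem.Dict.nodup_keys_ofList l
  -- the initial accumulator {metric: [] for metric in metrics_dicts[0]}
  set init := allowed.foldl (fun d k => d.insert k ([] : List Int)) PySem.Dict.empty with hinit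
  have hinit_items : init.items = allowed.map (fun k => (k, ([] : List Int))) := by
    have := PySem.Dict.items_foldl_insert_fresh (l := allowed) (k := fun x => x)
      (v := fun _ => ([] : List Int)) (d := PySem.Dict.empty)
      (fun a _ => PySem.Dict.contains_empty a) (by simpa using hnodup)
    simpa [PySem.Dict.empty] using this
  have hinit_keys : init.keys = allowed := by
    have h1 : init.keys = List.map ((fun x : String × List Int => x.1) ∘ fun k : String => (k, ([] : List Int))) allowed := by
      simp [PySem.Dict.keys, hinit_items, List.map_map]
    rw [h1]
    exact List.map_id allowed
  have hinit_getD : ∀ k, init.getD k [] = [] := by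
    intro k
    by_cases hk : k ∈ allowed
    · exact PySem.Dict.getD_of_mem_items init
        (by rw [hinit_items]; exact List.mem_map_of_mem hk) (by rw [hinit_keys]; exact hnodup) []
    · apply PySem.Dict.getD_of_not_contains
      have : ¬ (init.contains k = true) := by
        rw [PySem.Dict.contains_iff_mem_keys, hinit_keys]; exact hk
      simpa using this
  have hcont : ∀ d ∈ d0 :: ds, ∀ p ∈ d.items, init.contains p.1 = true := by
    intro d hd p hp
    rw [PySem.Dict.contains_iff_mem_keys, hinit_keys]
    exact hsub' d hd p.1 (List.mem_map_of_mem hp)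
  obtain ⟨md', hrun, hkeys, hget⟩ := pv_rows_ok (d0 :: ds) init hcont hnd
  -- B's validation guard holds
  have hguard : ((d0 :: ds).all (fun d => d.keys.all (fun k => allowed.contains k))) = true := by
    simp only [List.all_eq_true]
    intro d hd k hk
    simpa [List.contains_iff_mem] using hsub' d hd k hk
  rw [hrun, hguard]
  simp only [if_true]
  have hknodup' : md'.keys.Nodup := by rw [hkeys, hinit_keys]; exact hnodup
  rw [pv_items_eq_keys_map md' hknodup', hkeys, hinit_keys]
  apply List.map_congr_left
  intro k _
  rw [hget k, hinit_getD k, List.nil_append]
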